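-- pv_equiv track=rewrite | github.com/yasodhareddyy/abcde | can_split_string/t.py | can_split_string
-- ===== SOURCE A (Python) =====
-- def can_split_string(input_string, valid_words):
--     words_used = set()
--
--     for word in input_string.split():
--         if word in valid_words and word not in words_used:
--             words_used.add(word)
--         else:
--             return False
--
--     return True
-- ===== SOURCE B (Python) =====
-- def can_split_string(input_string, valid_words):
--     vset = set(valid_words)
--     prev = None
--     for w in sorted(input_string.split()):
--         if w not in vset or w == prev:
--             return False
--         prev = w
--     return True
-- ===== Notes on version B (the rewrite author's own statement) =====
-- stated objective: alternative
-- what changed: Duplicate detection by sorting the words and comparing each to its predecessor (equal words become adjacent), with validity checked against a prebuilt set, instead of A's single pass growing a seen-set; correct because in a sorted list duplicates are adjacent.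
import Mathlib
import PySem

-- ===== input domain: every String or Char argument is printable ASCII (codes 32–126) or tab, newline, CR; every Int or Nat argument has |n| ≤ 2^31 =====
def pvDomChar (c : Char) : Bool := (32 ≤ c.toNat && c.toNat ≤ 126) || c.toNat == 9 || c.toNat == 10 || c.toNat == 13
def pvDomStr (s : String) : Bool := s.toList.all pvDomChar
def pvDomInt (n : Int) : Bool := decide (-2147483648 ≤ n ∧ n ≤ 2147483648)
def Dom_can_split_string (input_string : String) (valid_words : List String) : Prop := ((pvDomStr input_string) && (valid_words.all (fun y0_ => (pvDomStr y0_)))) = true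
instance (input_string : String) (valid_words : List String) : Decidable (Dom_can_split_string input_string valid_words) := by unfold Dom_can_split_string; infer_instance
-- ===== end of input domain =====

-- B detects duplicates by SORTING the words and comparing each word to its predecessor
-- (equal words are adjacent in a sorted list), with validity checked against a prebuilt set,
-- instead of A's single pass growing a seen-set (objective: alternative; same return value).

-- ===== PORT A =====
-- the for-loop of A: carries the growing words_used set, returns False on first failure
def canSplitLoop (valid_words : List String) (words_used : PySem.Set String) : List String → Bool
  | [] => true
  | word :: rest =>
      if valid_words.contains word && !(PySem.Set.contains words_used word) then
        canSplitLoop valid_words (PySem.Set.add words_used word) rest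
      else
        false

def can_split_string (input_string : String) (valid_words : List String) : Bool :=
  canSplitLoop valid_words PySem.Set.empty (PySem.Str.split₀ input_string)

-- ===== PORT B =====
-- B's for-loop over the SORTED words, carrying prev (None before the first iteration)
def altLoop (vset : PySem.Set String) (prev : Option String) : List String → Bool
  | [] => true
  | w :: rest =>
      if !(PySem.Set.contains vset w) || (some w == prev) then false
      else altLoop vset (some w) rest

def can_split_string_alt (input_string : String) (valid_words : List String) : Bool :=
  altLoop (PySem.Set.ofList valid_words) none
    (PySem.List.sorted (PySem.Str.split₀ input_string) (fun x => x) false)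

-- ===== PRECONDITION & SPEC =====
def Spec_can_split_string (input_string : String) (valid_words : List String) (out : Bool) : Prop := out = can_split_string_alt input_string valid_words
instance (input_string : String) (valid_words : List String) (out : Bool) : Decidable (Spec_can_split_string input_string valid_words out) := by unfold Spec_can_split_string; infer_instance

-- ===== CLAIM (what is proved, stated in full; the proofs are below) =====
def Claim_equal_can_split_string : Prop := ∀ (input_string : String) (valid_words : List String), Dom_can_split_string input_string valid_words → Spec_can_split_string input_string valid_words (can_split_string input_string valid_words)

-- ===== LEMMAS AND PROOFS =====

-- A's loop succeeds iff every word is valid, the words are distinct, and none was already seen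
theorem canSplitLoop_iff (valid_words : List String) (ws : List String) :
    ∀ seen : PySem.Set String,
      canSplitLoop valid_words seen ws = true ↔
        (∀ w ∈ ws, valid_words.contains w = true) ∧ ws.Nodup ∧ (∀ w ∈ ws, w ∉ seen) := by
  induction ws with
  | nil => intro seen; simp [canSplitLoop]
  | cons w rest ih =>
    intro seen
    simp only [canSplitLoop]
    split
    · rename_i hcond
      simp only [Bool.and_eq_true, Bool.not_eq_true'] at hcond
      obtain ⟨hval, hseen⟩ := hcond
      rw [ih]
      have hwseen : w ∉ seen := by
        simpa [PySem.Set.contains_iff] using hseen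
      constructor
      · rintro ⟨h1, h2, h3⟩
        refine ⟨?_, ?_, ?_⟩
        · intro x hx
          rcases List.mem_cons.1 hx with h | h
          · exact h ▸ hval
          · exact h1 x h
        · refine List.nodup_cons.2 ⟨?_, h2⟩
          intro hw
          exact (h3 w hw) (by simp [PySem.Set.mem_add])
        · intro x hx h
          rcases List.mem_cons.1 hx with he | hm
          · exact hwseen (he ▸ h)
          · exact h3 x hm (by simp [PySem.Set.mem_add, h])
      · rintro ⟨h1, h2, h3⟩
        refine ⟨fun x hx => h1 x (List.mem_cons_of_mem _ hx), (List.nodup_cons.1 h2).2, ?_⟩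
        intro x hx hmem
        rcases (PySem.Set.mem_add (s := seen) (x := w) (y := x)).1 hmem with h | h
        · exact h3 x (List.mem_cons_of_mem _ hx) h
        · exact (List.nodup_cons.1 h2).1 (h ▸ hx)
    · rename_i hcond
      refine ⟨fun h => by simp at h, ?_⟩
      rintro ⟨h1, h2, h3⟩
      exfalso
      apply hcond
      have hv := h1 w List.mem_cons_self
      have hs : PySem.Set.contains seen w = false := by
        rw [← Bool.not_eq_true]
        intro hc
        exact h3 w List.mem_cons_self (by simpa [PySem.Set.contains_iff] using hc)
      simp only [Bool.and_eq_true, Bool.not_eq_true']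
      exact ⟨hv, hs⟩

-- B's loop over a SORTED list succeeds iff every word is in vset, the list is duplicate-free,
-- and the head differs from prev; prev is ≤ everything in the list along the way.
theorem altLoop_iff (vset : PySem.Set String) (l : List String) :
    l.Pairwise (· ≤ ·) →
    ∀ prev : Option String, (∀ p, prev = some p → ∀ x ∈ l, p ≤ x) →
      (altLoop vset prev l = true ↔
        (∀ w ∈ l, PySem.Set.contains vset w = true) ∧ l.Nodup ∧
          (∀ p, prev = some p → p ∉ l)) := by
  induction l with
  | nil => intro _ prev _; simp [altLoop]
  | cons w rest ih =>
    intro hsort prev hprev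
    obtain ⟨hw_le, hrest_sort⟩ := List.pairwise_cons.1 hsort
    simp only [altLoop]
    split
    · rename_i hcond
      simp only [Bool.or_eq_true, Bool.not_eq_true', beq_iff_eq] at hcond
      constructor
      · intro h; exact absurd h (by simp)
      · rintro ⟨h1, h2, h3⟩
        rcases hcond with hc | hc
        · have := h1 w List.mem_cons_self
          rw [hc] at this
          exact this
        · exact ((h3 w hc.symm List.mem_cons_self).elim : false = true)
    · rename_i hcond
      simp only [Bool.or_eq_true, Bool.not_eq_true', beq_iff_eq, not_or] at hcond
      obtain ⟨hcw, hcp⟩ := hcond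
      have hcw' : PySem.Set.contains vset w = true := by
        cases h : PySem.Set.contains vset w
        · exact absurd h hcw
        · rfl
      rw [ih hrest_sort (some w) (by rintro p hp x hx; cases Option.some.inj hp; exact hw_le x hx)]
      constructor
      · rintro ⟨h1, h2, h3⟩
        have hw_rest : w ∉ rest := h3 w rfl
        refine ⟨?_, List.nodup_cons.2 ⟨hw_rest, h2⟩, ?_⟩
        · intro x hx
          rcases List.mem_cons.1 hx with h | h
          · exact h ▸ hcw'
          · exact h1 x h
        · intro p hp hmem
          subst hp
          rcases List.mem_cons.1 hmem with h | h
          · exact hcp (congrArg some h.symm)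
          · -- p ∈ rest, p ≤ w (from hprev) and w ≤ p (sortedness) ⇒ p = w ⇒ contradiction
            have h1' : p ≤ w := hprev p rfl w List.mem_cons_self
            have h2' : w ≤ p := hw_le p h
            have : p = w := le_antisymm h1' h2'
            exact hcp (congrArg some this.symm)
      · rintro ⟨h1, h2, h3⟩
        refine ⟨fun x hx => h1 x (List.mem_cons_of_mem _ hx), (List.nodup_cons.1 h2).2, ?_⟩
        rintro p hp hmem
        cases Option.some.inj hp
        exact (List.nodup_cons.1 h2).1 hmem

-- ===== VERDICT (by name: the statement is the Claim_ definition above) =====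
theorem can_split_string_spec : Claim_equal_can_split_string := by
  intro input_string valid_words _
  unfold Spec_can_split_string can_split_string can_split_string_alt
  have hperm : (PySem.List.sorted (PySem.Str.split₀ input_string) (fun x => x) false).Perm
      (PySem.Str.split₀ input_string) := PySem.List.sorted_perm _ _ _
  have hsort : (PySem.List.sorted (PySem.Str.split₀ input_string) (fun x => x) false).Pairwise
      (fun a b => a ≤ b) := PySem.List.sorted_pairwise _ _
  rw [Bool.eq_iff_iff, canSplitLoop_iff,
    altLoop_iff _ _ hsort none (by rintro p ⟨⟩)]
  constructor
  · rintro ⟨h1, h2, _⟩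
    refine ⟨?_, ?_, by rintro p ⟨⟩⟩
    · intro w hw
      have hw' : w ∈ PySem.Str.split₀ input_string := hperm.mem_iff.1 hw
      simpa [PySem.Set.contains_iff, PySem.Set.mem_ofList] using h1 w hw'
    · exact hperm.nodup_iff.2 h2
  · rintro ⟨h1, h2, _⟩
    refine ⟨?_, hperm.nodup_iff.1 h2, fun w _ h => by simp [PySem.Set.empty] at h⟩
    intro w hw
    have hw' := h1 w (hperm.mem_iff.2 hw)
    simpa [PySem.Set.contains_iff, PySem.Set.mem_ofList] using hw'
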